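-- pv_equiv track=rewrite | github.com/vigge93-BTH-courses/DV1574-Programmering-python | Inlämning_2.py | get_numbers_wrong_place
-- ===== SOURCE A (Python) =====
-- def get_correct_numbers(nums, code):
--     res = []
--     for i in range(CODE_LEN):
--         if nums[i] == code[i]:
--             res.append(nums[i])
--     return res
--
-- def get_numbers_wrong_place(nums, code):
--     code = code[:]
--     nums = nums[:]
--     correct = get_correct_numbers(nums, code)
--     for i in correct:
--         nums.remove(i)
--         code.remove(i)
--     tot = 0
--     for i in range(len(nums)):
--         j = 0
--         while j < len(code):
--             if nums[i] == code[j]: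
--                 code.pop(j)
--                 tot += 1
--                 break
--             j += 1
--     return tot
--
-- CODE_LEN = 4
-- ===== SOURCE B (Python) =====
-- CODE_LEN = 4
--
-- def get_numbers_wrong_place(nums, code):
--     exact = sum(1 for i in range(CODE_LEN) if nums[i] == code[i])
--     overlap = sum(min(nums.count(v), code.count(v)) for v in set(nums))
--     return overlap - exact
-- ===== Notes on version B (the rewrite author's own statement) =====
-- stated objective: simpler
-- what changed: Replaced A's list-copying remove-by-value loop plus nested greedy matching scans by closed multiset arithmetic: exact-position matches over range(4) subtracted from the multiset overlap sum(min(nums.count(v), code.count(v)) for v in set(nums)).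
import Mathlib
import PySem

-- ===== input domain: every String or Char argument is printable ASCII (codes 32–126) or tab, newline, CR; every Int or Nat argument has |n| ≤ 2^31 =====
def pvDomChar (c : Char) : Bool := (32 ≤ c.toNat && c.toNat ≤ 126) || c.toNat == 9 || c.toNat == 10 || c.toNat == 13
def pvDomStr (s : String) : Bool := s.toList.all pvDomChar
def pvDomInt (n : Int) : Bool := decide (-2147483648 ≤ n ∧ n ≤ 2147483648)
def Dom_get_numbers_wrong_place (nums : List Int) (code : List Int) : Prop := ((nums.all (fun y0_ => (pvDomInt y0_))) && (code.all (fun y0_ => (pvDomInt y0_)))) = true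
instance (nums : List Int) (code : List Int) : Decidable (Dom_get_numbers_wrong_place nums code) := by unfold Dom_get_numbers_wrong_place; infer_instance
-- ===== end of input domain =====

-- B replaces A's copy/remove/greedy nested loops by closed multiset arithmetic:
-- exact-position matches subtracted from the multiset overlap of the two lists (objective: simpler).

-- ===== PORT A =====
-- res = []; for i in range(CODE_LEN): if nums[i] == code[i]: res.append(nums[i])
def pvCorrect (nums code : List Int) : List Int :=
  (PySem.List.pyRange 0 4 1).foldl (fun res i =>
    match PySem.List.pyGet? nums i, PySem.List.pyGet? code i with
    | some a, some b => if a = b then res ++ [a] else res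
    | _, _ => res) []

-- the inner 'while j < len(code): if nums[i] == code[j]: code.pop(j); tot += 1; break': scan
-- code left to right, pop the first match (none = the while loop found no match)
def pvMatchPop (x : Int) : List Int → Option (List Int)
  | [] => none
  | c :: cs => if x = c then some cs else (pvMatchPop x cs).map (c :: ·)

-- the outer 'for i in range(len(nums))' loop with its tot counter and shrinking code
def pvGreedy (nums : List Int) (code : List Int) (tot : Int) : Int :=
  match nums with
  | [] => tot
  | x :: xs =>
    match pvMatchPop x code with
    | some code' => pvGreedy xs code' (tot + 1)
    | none => pvGreedy xs code tot

def get_numbers_wrong_place (nums : List Int) (code : List Int) : Int :=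
  let correct := pvCorrect nums code
  -- for i in correct: nums.remove(i); code.remove(i)   (remove never fails on admitted inputs)
  let p := correct.foldl (fun (p : List Int × List Int) i =>
    ((PySem.List.remove? p.1 i).getD p.1, (PySem.List.remove? p.2 i).getD p.2)) (nums, code)
  pvGreedy p.1 p.2 0

-- ===== PORT B =====
def get_numbers_wrong_place_alt (nums : List Int) (code : List Int) : Int :=
  -- exact = sum(1 for i in range(CODE_LEN) if nums[i] == code[i])
  let exact : Int := (PySem.List.pyRange 0 4 1).foldl (fun acc i =>
    match PySem.List.pyGet? nums i, PySem.List.pyGet? code i with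
    | some a, some b => if a = b then acc + 1 else acc
    | _, _ => acc) 0
  -- overlap = sum(min(nums.count(v), code.count(v)) for v in set(nums))
  let overlap : Int := (PySem.Set.ofList nums).foldl (fun acc v =>
    acc + ((min (PySem.List.count nums v) (PySem.List.count code v) : Nat) : Int)) 0
  overlap - exact

-- ===== PRECONDITION & SPEC =====
-- A (and B) index nums[i] and code[i] for i < 4: lists shorter than 4 raise IndexError.
def Pre_get_numbers_wrong_place (nums : List Int) (code : List Int) : Prop :=
  4 ≤ nums.length ∧ 4 ≤ code.length
instance (nums : List Int) (code : List Int) : Decidable (Pre_get_numbers_wrong_place nums code) := by unfold Pre_get_numbers_wrong_place; infer_instance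
def pvWitness_get_numbers_wrong_place : List Int × List Int := ([1, 2, 3, 4], [4, 3, 3, 1])
def Spec_get_numbers_wrong_place (nums : List Int) (code : List Int) (out : Int) : Prop := out = get_numbers_wrong_place_alt nums code
instance (nums : List Int) (code : List Int) (out : Int) : Decidable (Spec_get_numbers_wrong_place nums code out) := by unfold Spec_get_numbers_wrong_place; infer_instance

-- ===== CLAIM (what is proved, stated in full; the proofs are below) =====
def Claim_equal_get_numbers_wrong_place : Prop := ∀ (nums : List Int) (code : List Int), Dom_get_numbers_wrong_place nums code → Pre_get_numbers_wrong_place nums code → Spec_get_numbers_wrong_place nums code (get_numbers_wrong_place nums code)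

-- ===== LEMMAS AND PROOFS =====

-- structural form of the exact-match pass over the first four positions
def corrZip : List Int → List Int → List Int
  | a :: as, b :: bs => if a = b then a :: corrZip as bs else corrZip as bs
  | _, _ => []

lemma count_corrZip_le_left (v : Int) : ∀ (xs ys : List Int),
    (corrZip xs ys).count v ≤ xs.count v := by
  intro xs
  induction xs with
  | nil => intro ys; simp [corrZip]
  | cons a as ih =>
    intro ys
    cases ys with
    | nil => simp [corrZip]
    | cons b bs =>
      have h := ih bs
      simp only [corrZip]
      split_ifs with hab <;> by_cases hva : a = v <;> simp [hva] <;> omega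

lemma count_corrZip_le_right (v : Int) : ∀ (xs ys : List Int),
    (corrZip xs ys).count v ≤ ys.count v := by
  intro xs
  induction xs with
  | nil => intro ys; simp [corrZip]
  | cons a as ih =>
    intro ys
    cases ys with
    | nil => simp [corrZip]
    | cons b bs =>
      have h := ih bs
      simp only [corrZip]
      split_ifs with hab <;> by_cases hvb : b = v <;> simp [hvb, hab] <;> omega

lemma matchPop_eq (x : Int) : ∀ (l : List Int),
    pvMatchPop x l = if x ∈ l then some (l.erase x) else none := by
  intro l
  induction l with
  | nil => simp [pvMatchPop]
  | cons c cs ih =>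
    by_cases hxc : x = c
    · subst hxc; simp [pvMatchPop, List.erase_cons_head]
    · have : (c == x) = false := by simp [Ne.symm hxc]
      simp [pvMatchPop, hxc, ih, this]

lemma greedy_eq (nums : List Int) : ∀ (code : List Int) (t : Int),
    pvGreedy nums code t = t + (((nums : Multiset Int) ∩ (code : Multiset Int)).card : Int) := by
  induction nums with
  | nil => intro code t; simp [pvGreedy]
  | cons x xs ih =>
    intro code t
    rw [pvGreedy, matchPop_eq]
    by_cases hx : x ∈ code
    · have hxm : x ∈ (code : Multiset Int) := by simpa using hx
      simp only [hx, if_true]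
      rw [ih, ← Multiset.cons_coe, Multiset.cons_inter_of_pos _ hxm, ← Multiset.coe_erase]
      simp; ring
    · have hxm : x ∉ (code : Multiset Int) := by simpa using hx
      simp only [hx, if_false]
      rw [ih, ← Multiset.cons_coe, Multiset.cons_inter_of_neg _ hxm]

-- removing a common value commutes with the multiset intersection
lemma erase_inter (s t : Multiset Int) (a : Int) (hs : a ∈ s) (ht : a ∈ t) :
    (s.erase a) ∩ (t.erase a) = (s ∩ t).erase a := by
  ext v
  rw [Multiset.count_inter]
  by_cases hv : v = a
  · subst hv
    rw [Multiset.count_erase_self, Multiset.count_erase_self, Multiset.count_erase_self,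
      Multiset.count_inter]
    have h1 := Multiset.one_le_count_iff_mem.mpr hs
    have h2 := Multiset.one_le_count_iff_mem.mpr ht
    omega
  · rw [Multiset.count_erase_of_ne hv, Multiset.count_erase_of_ne hv,
      Multiset.count_erase_of_ne hv, Multiset.count_inter]

-- the remove-for-each-correct loop, multiset-wise
lemma remove_fold (u : List Int) : ∀ (nums code : List Int),
    (u : Multiset Int) ≤ (nums : Multiset Int) ∩ (code : Multiset Int) →
    (u.foldl (fun (p : List Int × List Int) i =>
        ((PySem.List.remove? p.1 i).getD p.1, (PySem.List.remove? p.2 i).getD p.2)) (nums, code)) =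
      (u.foldl (fun l i => l.erase i) nums, u.foldl (fun l i => l.erase i) code) ∧
    ((u.foldl (fun l i => l.erase i) nums : List Int) : Multiset Int)
        ∩ ((u.foldl (fun l i => l.erase i) code : List Int) : Multiset Int)
      = (nums : Multiset Int) ∩ (code : Multiset Int) - (u : Multiset Int) := by
  induction u with
  | nil => intro nums code _; simp
  | cons a u ih =>
    intro nums code h
    have ha : a ∈ (nums : Multiset Int) ∩ (code : Multiset Int) := by
      refine Multiset.mem_of_le h ?_; simp
    have han : a ∈ nums := by
      have := Multiset.mem_inter.mp ha; simpa using this.1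
    have hac : a ∈ code := by
      have := Multiset.mem_inter.mp ha; simpa using this.2
    have h' : a ::ₘ (u : Multiset Int) ≤ (nums : Multiset Int) ∩ (code : Multiset Int) := by
      rw [Multiset.cons_coe]; exact h
    have hrec : (u : Multiset Int) ≤ ((nums.erase a : List Int) : Multiset Int) ∩ ((code.erase a : List Int) : Multiset Int) := by
      rw [← Multiset.coe_erase, ← Multiset.coe_erase,
        erase_inter _ _ _ (by simpa using han) (by simpa using hac)]
      simpa [Multiset.erase_cons_head] using Multiset.erase_le_erase a h'
    obtain ⟨h1, h2⟩ := ih (nums.erase a) (code.erase a) hrec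
    constructor
    · simp only [List.foldl_cons,
        PySem.List.remove?_eq_some_erase _ _ han, PySem.List.remove?_eq_some_erase _ _ hac,
        Option.getD_some]
      exact h1
    · simp only [List.foldl_cons]
      rw [h2, ← Multiset.coe_erase, ← Multiset.coe_erase,
        erase_inter _ _ _ (by simpa using han) (by simpa using hac)]
      rw [← Multiset.cons_coe, Multiset.sub_cons]

-- B's overlap sum is the cardinality of the multiset intersection
lemma overlap_eq (nums code : List Int) :
    ((PySem.Set.ofList nums).foldl (fun acc v =>
        acc + ((min (PySem.List.count nums v) (PySem.List.count code v) : Nat) : Int)) 0 : Int)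
      = (((nums : Multiset Int) ∩ (code : Multiset Int)).card : Int) := by
  rw [PySem.List.foldl_add
    (g := fun v => ((min (PySem.List.count nums v) (PySem.List.count code v) : Nat) : Int))]
  have hnodup : (PySem.Set.ofList nums).Nodup := PySem.Set.nodup_ofList nums
  have hfs : (PySem.Set.ofList nums).toFinset = nums.toFinset := by
    ext v; simp [PySem.Set.mem_ofList]
  have h1 : ∑ v ∈ nums.toFinset, ((min (nums.count v) (code.count v) : Nat) : Int)
      = (((PySem.Set.ofList nums).map (fun v =>
          ((min (PySem.List.count nums v) (PySem.List.count code v) : Nat) : Int))).sum : Int) := by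
    rw [← hfs, List.sum_toFinset _ hnodup]
    refine congrArg List.sum (List.map_congr_left fun v _ => ?_)
    simp [PySem.List.count_eq]
  rw [← h1, zero_add]
  have h2 : ((((nums : Multiset Int) ∩ (code : Multiset Int)).card : Nat) : Int)
      = ∑ v ∈ ((nums : Multiset Int) ∩ (code : Multiset Int)).toFinset,
          ((Multiset.count v ((nums : Multiset Int) ∩ (code : Multiset Int)) : Nat) : Int) := by
    rw [← Multiset.toFinset_sum_count_eq ((nums : Multiset Int) ∩ (code : Multiset Int))]
    push_cast
    rfl
  have hsub : (((nums : Multiset Int) ∩ (code : Multiset Int)).toFinset : Finset Int) ⊆ nums.toFinset := by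
    intro v hv
    have hvm : v ∈ (nums : Multiset Int) ∩ (code : Multiset Int) := by simpa using hv
    have := Multiset.mem_inter.mp hvm
    simpa using this.1
  have hzero : ∀ v ∈ nums.toFinset, v ∉ (((nums : Multiset Int) ∩ (code : Multiset Int)).toFinset : Finset Int) →
      ((min (nums.count v) (code.count v) : Nat) : Int) = 0 := by
    intro v hvn hv
    have hvm : v ∉ (nums : Multiset Int) ∩ (code : Multiset Int) := by simpa using hv
    have hvc : v ∉ code := fun hcmem =>
      hvm (Multiset.mem_inter.mpr ⟨by simpa using List.mem_toFinset.mp hvn, by simpa using hcmem⟩)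
    have h0 : code.count v = 0 := List.count_eq_zero_of_not_mem hvc
    simp [h0]
  calc ∑ v ∈ nums.toFinset, ((min (nums.count v) (code.count v) : Nat) : Int)
      = ∑ v ∈ ((nums : Multiset Int) ∩ (code : Multiset Int)).toFinset,
          ((min (nums.count v) (code.count v) : Nat) : Int) := (Finset.sum_subset hsub hzero).symm
    _ = ∑ v ∈ ((nums : Multiset Int) ∩ (code : Multiset Int)).toFinset,
          ((Multiset.count v ((nums : Multiset Int) ∩ (code : Multiset Int)) : Nat) : Int) :=
        Finset.sum_congr rfl (fun v _ => by rw [Multiset.count_inter]; simp)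
    _ = ((((nums : Multiset Int) ∩ (code : Multiset Int)).card : Nat) : Int) := h2.symm

-- with both lists at least 4 long, A's correct-pass is corrZip on the 4-prefixes,
-- and B's exact counter is its length
lemma correct_exact_eq (nums code : List Int)
    (hn : 4 ≤ nums.length) (hc : 4 ≤ code.length) :
    pvCorrect nums code = corrZip (nums.take 4) (code.take 4) ∧
    ((PySem.List.pyRange 0 4 1).foldl (fun acc i =>
      match PySem.List.pyGet? nums i, PySem.List.pyGet? code i with
      | some a, some b => if a = b then acc + 1 else acc
      | _, _ => acc) (0 : Int))
      = ((corrZip (nums.take 4) (code.take 4)).length : Int) := by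
  match nums, code with
  | a :: b :: c :: d :: r, e :: f :: g :: h :: s =>
    have hr : PySem.List.pyRange 0 4 1 = [0, 1, 2, 3] := by decide
    have g0 : ∀ (x0 x1 x2 x3 : Int) (t : List Int),
        PySem.List.pyGet? (x0::x1::x2::x3::t) (0 : Int) = some x0 := by
      intro x0 x1 x2 x3 t
      rw [PySem.List.pyGet?_of_nonneg (xs := x0::x1::x2::x3::t) (i := 0) (by norm_num)]; rfl
    have g1 : ∀ (x0 x1 x2 x3 : Int) (t : List Int),
        PySem.List.pyGet? (x0::x1::x2::x3::t) (1 : Int) = some x1 := by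
      intro x0 x1 x2 x3 t
      rw [PySem.List.pyGet?_of_nonneg (xs := x0::x1::x2::x3::t) (i := 1) (by norm_num)]; rfl
    have g2 : ∀ (x0 x1 x2 x3 : Int) (t : List Int),
        PySem.List.pyGet? (x0::x1::x2::x3::t) (2 : Int) = some x2 := by
      intro x0 x1 x2 x3 t
      rw [PySem.List.pyGet?_of_nonneg (xs := x0::x1::x2::x3::t) (i := 2) (by norm_num)]; rfl
    have g3 : ∀ (x0 x1 x2 x3 : Int) (t : List Int),
        PySem.List.pyGet? (x0::x1::x2::x3::t) (3 : Int) = some x3 := by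
      intro x0 x1 x2 x3 t
      rw [PySem.List.pyGet?_of_nonneg (xs := x0::x1::x2::x3::t) (i := 3) (by norm_num)]; rfl
    constructor <;>
    · simp only [pvCorrect, hr, List.foldl_cons, List.foldl_nil, g0, g1, g2, g3, List.take,
        corrZip]
      split_ifs <;> simp
  | [], _ => simp at hn
  | [_], _ => simp at hn
  | [_, _], _ => simp at hn
  | [_, _, _], _ => simp at hn
  | _ :: _ :: _ :: _ :: _, [] => simp at hc
  | _ :: _ :: _ :: _ :: _, [_] => simp at hc
  | _ :: _ :: _ :: _ :: _, [_, _] => simp at hc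
  | _ :: _ :: _ :: _ :: _, [_, _, _] => simp at hc

lemma corr_le_inter (nums code : List Int) :
    ((corrZip (nums.take 4) (code.take 4) : List Int) : Multiset Int)
      ≤ (nums : Multiset Int) ∩ (code : Multiset Int) := by
  apply Multiset.le_iff_count.mpr
  intro v
  rw [Multiset.count_inter]
  have h1 := count_corrZip_le_left v (nums.take 4) (code.take 4)
  have h2 := count_corrZip_le_right v (nums.take 4) (code.take 4)
  have h3 := (nums.take_sublist 4).count_le (a := v)
  have h4 := (code.take_sublist 4).count_le (a := v)
  simp only [Multiset.coe_count]
  omega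

-- ===== VERDICT (by name: the statement is the Claim_ definition above) =====
theorem get_numbers_wrong_place_spec : Claim_equal_get_numbers_wrong_place := by
  intro nums code _ hpre
  obtain ⟨hn, hc⟩ := hpre
  unfold Spec_get_numbers_wrong_place get_numbers_wrong_place get_numbers_wrong_place_alt
  obtain ⟨hcorr, hexact⟩ := correct_exact_eq nums code hn hc
  set u := corrZip (nums.take 4) (code.take 4) with hu
  have hle := corr_le_inter nums code
  obtain ⟨hfold, hinter⟩ := remove_fold u nums code hle
  simp only [hcorr, hfold, hexact]
  rw [greedy_eq, hinter, overlap_eq]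
  have hcard : (u : Multiset Int).card ≤ ((nums : Multiset Int) ∩ (code : Multiset Int)).card :=
    Multiset.card_le_card hle
  rw [Multiset.card_sub hle]
  simp only [Multiset.coe_card] at hcard ⊢
  rw [← hu]
  omega
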